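-- pv_equiv track=rewrite | github.com/tirameeso/dsaproject3 | backend/main_merge.py | searchEng
-- ===== SOURCE A (Python) =====
-- def searchEng(frag, notes):
--     # List to hold all perfumes that match ALL notes
--     allNotes = []
--
--     # Dictionary to hold fragrances for individual notes
--     noteResults = {note: [] for note in notes}
--
--     for f in frag:
--         # Track which notes this fragrance matches
--         matchingNotes = set()
--
--         for n in f[2]:  # Iterate over the fragrance's notes
--             for note in notes:
--                 if note in n.lower():
--                     matchingNotes.add(note)
--
--         # If the fragrance matches all notes, add it to `allNotes`
--         if len(matchingNotes) == len(notes):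
--             allNotes.append(f)
--
--         # Add the fragrance to the dictionary for each matched note
--         for matchedNote in matchingNotes:
--             noteResults[matchedNote].append(f)
--
--     return allNotes, noteResults
-- ===== SOURCE B (Python) =====
-- def searchEng(frag, notes):
--     # lower each fragrance's note strings once, keep them alongside the fragrance
--     lows = [(f, [n.lower() for n in f[2]]) for f in frag]
--     allNotes = [f for f, low in lows
--                 if len({note for note in notes if any(note in s for s in low)}) == len(notes)]
--     noteResults = {note: [f for f, low in lows if any(note in s for s in low)]
--                    for note in notes}
--     return allNotes, noteResults
-- ===== Notes on version B (the rewrite author's own statement) =====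
-- stated objective: simpler
-- what changed: A's nested per-fragrance loops that mutate a set, a list and a dict are replaced by note-major comprehensions: each fragrance's note strings are lowered once, allNotes is a single filter over fragrances, and noteResults is built per query note by a direct filter, with no incremental dict/set mutation.
import Mathlib
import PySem

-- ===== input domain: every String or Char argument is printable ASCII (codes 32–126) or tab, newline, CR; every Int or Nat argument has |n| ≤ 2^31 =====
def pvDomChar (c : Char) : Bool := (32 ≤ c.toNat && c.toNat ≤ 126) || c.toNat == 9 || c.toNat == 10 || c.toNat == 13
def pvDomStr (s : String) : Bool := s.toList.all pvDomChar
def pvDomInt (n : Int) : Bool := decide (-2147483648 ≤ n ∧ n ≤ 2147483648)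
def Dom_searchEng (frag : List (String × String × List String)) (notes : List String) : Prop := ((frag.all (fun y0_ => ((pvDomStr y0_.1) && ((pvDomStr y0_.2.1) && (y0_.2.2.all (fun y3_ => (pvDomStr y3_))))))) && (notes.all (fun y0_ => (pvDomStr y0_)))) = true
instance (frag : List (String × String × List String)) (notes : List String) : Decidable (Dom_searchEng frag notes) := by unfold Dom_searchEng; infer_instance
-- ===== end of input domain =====

-- B replaces A's nested per-fragrance loops (mutating a set, a list and a dict) by note-major
-- comprehensions over once-lowered note strings; objective: simpler, same asymptotic cost.


-- ===== PORT A =====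
def searchEng (frag : List (String × String × List String)) (notes : List String) : (List (String × String × List String)) × (List (String × List (String × String × List String))) :=
  -- allNotes = []
  -- noteResults = {note: [] for note in notes}
  let noteResults : PySem.Dict String (List (String × String × List String)) :=
    notes.foldl (fun d note => d.insert note []) PySem.Dict.empty
  -- for f in frag: …
  let st :=
    frag.foldl (fun (acc : (List (String × String × List String)) × PySem.Dict String (List (String × String × List String))) f =>
      -- matchingNotes = set(); for n in f[2]: for note in notes: if note in n.lower(): matchingNotes.add(note)
      let matchingNotes : PySem.Set String :=
        f.2.2.foldl (fun mn n =>
          notes.foldl (fun mn note =>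
            if PySem.Str.isIn note (PySem.Str.lower n) then PySem.Set.add mn note else mn) mn)
          PySem.Set.empty
      -- if len(matchingNotes) == len(notes): allNotes.append(f)
      let allNotes := if matchingNotes.length = notes.length then acc.1 ++ [f] else acc.1
      -- for matchedNote in matchingNotes: noteResults[matchedNote].append(f)
      let noteResults := matchingNotes.foldl (fun d m => d.modify m [] (· ++ [f])) acc.2
      (allNotes, noteResults))
      ([], noteResults)
  (st.1, st.2.items)

-- ===== PORT B =====
def searchEng_alt (frag : List (String × String × List String)) (notes : List String) : (List (String × String × List String)) × (List (String × List (String × String × List String))) :=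
  -- lows = [(f, [n.lower() for n in f[2]]) for f in frag]
  let lows := frag.map (fun f => (f, f.2.2.map PySem.Str.lower))
  -- allNotes = [f for f, low in lows if len({note for note in notes if any(note in s for s in low)}) == len(notes)]
  let allNotes := (lows.filter (fun p =>
      (PySem.Set.ofList (notes.filter (fun note => p.2.any (fun s => PySem.Str.isIn note s)))).length == notes.length)).map (·.1)
  -- noteResults = {note: [f for f, low in lows if any(note in s for s in low)] for note in notes}
  let noteResults : PySem.Dict String (List (String × String × List String)) :=
    notes.foldl (fun d note =>
      d.insert note ((lows.filter (fun p => p.2.any (fun s => PySem.Str.isIn note s))).map (·.1))) PySem.Dict.empty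
  (allNotes, noteResults.items)

-- ===== PRECONDITION & SPEC =====
def Spec_searchEng (frag : List (String × String × List String)) (notes : List String) (out : (List (String × String × List String)) × (List (String × List (String × String × List String)))) : Prop := out = searchEng_alt frag notes
instance (frag : List (String × String × List String)) (notes : List String) (out : (List (String × String × List String)) × (List (String × List (String × String × List String)))) : Decidable (Spec_searchEng frag notes out) := by unfold Spec_searchEng; infer_instance

-- ===== CLAIM (what is proved, stated in full; the proofs are below) =====
def Claim_equal_searchEng : Prop := ∀ (frag : List (String × String × List String)) (notes : List String), Dom_searchEng frag notes → Spec_searchEng frag notes (searchEng frag notes)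

-- ===== LEMMAS AND PROOFS =====

-- f matches a query note: some note string of f contains it (lower-cased), B's test
def hits (f : String × String × List String) (note : String) : Bool :=
  f.2.2.any (fun n => PySem.Str.isIn note (PySem.Str.lower n))

-- A's matchingNotes set for a fragrance (definitionally the port's inner double loop)
def msetOf (notes : List String) (f : String × String × List String) : PySem.Set String :=
  f.2.2.foldl (fun mn n =>
    notes.foldl (fun mn note =>
      if PySem.Str.isIn note (PySem.Str.lower n) then PySem.Set.add mn note else mn) mn)
    PySem.Set.empty

theorem mem_foldl_update {α β : Type} [BEq α] [LawfulBEq α] (l : List β) (g : β → List α)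
    (s : PySem.Set α) (y : α) :
    y ∈ l.foldl (fun s n => PySem.Set.update s (g n)) s ↔ y ∈ s ∨ ∃ n ∈ l, y ∈ g n := by
  induction l generalizing s with
  | nil => simp
  | cons n t ih => simp [ih, PySem.Set.mem_update, or_assoc]

theorem nodup_foldl_update {α β : Type} [BEq α] [LawfulBEq α] (l : List β) (g : β → List α)
    (s : PySem.Set α) (hs : s.Nodup) :
    (l.foldl (fun s n => PySem.Set.update s (g n)) s).Nodup := by
  induction l generalizing s with
  | nil => exact hs
  | cons n t ih => exact ih _ (PySem.Set.nodup_update _ _ hs)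

theorem msetOf_eq_foldl_update (notes : List String) (f : String × String × List String) :
    msetOf notes f = f.2.2.foldl (fun mn n =>
      PySem.Set.update mn (notes.filter (fun note => PySem.Str.isIn note (PySem.Str.lower n))))
      PySem.Set.empty := by
  unfold msetOf
  apply PySem.List.foldl_congr_mem
  intro acc n _
  rw [PySem.List.foldl_if_eq_foldl_filter]
  rfl

theorem mem_msetOf (notes : List String) (f : String × String × List String) (y : String) :
    y ∈ msetOf notes f ↔ y ∈ notes ∧ hits f y := by
  rw [msetOf_eq_foldl_update, mem_foldl_update]
  simp [hits, List.mem_filter]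
  tauto

theorem nodup_msetOf (notes : List String) (f : String × String × List String) :
    (msetOf notes f).Nodup := by
  rw [msetOf_eq_foldl_update]
  exact nodup_foldl_update _ _ _ List.nodup_nil

theorem msetOf_length (notes : List String) (f : String × String × List String) :
    (msetOf notes f).length
      = (PySem.Set.ofList (notes.filter (fun note => hits f note))).length := by
  refine List.Perm.length_eq ?_
  refine (List.perm_ext_iff_of_nodup (nodup_msetOf notes f) (PySem.Set.nodup_ofList _)).mpr ?_
  intro a
  simp [mem_msetOf, PySem.Set.mem_ofList, List.mem_filter]


theorem getD_foldl_modify_mem (S : List String) (hS : S.Nodup)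
    (f : String × String × List String)
    (d : PySem.Dict String (List (String × String × List String))) (k : String) :
    (S.foldl (fun d m => d.modify m [] (· ++ [f])) d).getD k []
      = if k ∈ S then d.getD k [] ++ [f] else d.getD k [] := by
  induction S generalizing d with
  | nil => simp
  | cons m t ih =>
    have hm : m ∉ t := (List.nodup_cons.mp hS).1
    rw [List.foldl_cons, ih (List.nodup_cons.mp hS).2]
    by_cases hkt : k ∈ t
    · have hne : k ≠ m := fun h => hm (h ▸ hkt)
      simp [hkt, PySem.Dict.getD_modify, hne]
    · by_cases hkm : k = m <;> simp [hkt, hkm, hm, PySem.Dict.getD_modify]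

theorem getD_foldl_insert_fun (ns : List String)
    (v : String → List (String × String × List String))
    (d : PySem.Dict String (List (String × String × List String))) (k : String) :
    (ns.foldl (fun d note => d.insert note (v note)) d).getD k []
      = if k ∈ ns then v k else d.getD k [] := by
  induction ns generalizing d with
  | nil => simp
  | cons m t ih =>
    rw [List.foldl_cons, ih]
    by_cases hkt : k ∈ t
    · simp [hkt]
    · by_cases hkm : k = m <;> simp [hkt, hkm, PySem.Dict.getD_insert]

theorem dictA_getD (notes : List String) (frag : List (String × String × List String))
    (d : PySem.Dict String (List (String × String × List String))) (k : String) :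
    (frag.foldl (fun d f => (msetOf notes f).foldl (fun d m => d.modify m [] (· ++ [f])) d) d).getD k []
      = d.getD k [] ++ frag.filter (fun f => decide (k ∈ msetOf notes f)) := by
  induction frag generalizing d with
  | nil => simp
  | cons f t ih =>
    rw [List.foldl_cons, ih, getD_foldl_modify_mem _ (nodup_msetOf notes f)]
    by_cases h : k ∈ msetOf notes f <;> simp [h, List.append_assoc]

theorem dictA_keys (notes : List String) (frag : List (String × String × List String))
    (d : PySem.Dict String (List (String × String × List String)))
    (hd : d.keys = PySem.Set.ofList notes) :
    (frag.foldl (fun d f => (msetOf notes f).foldl (fun d m => d.modify m [] (· ++ [f])) d) d).keys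
      = PySem.Set.ofList notes := by
  induction frag generalizing d with
  | nil => exact hd
  | cons f t ih =>
    rw [List.foldl_cons]
    apply ih
    rw [PySem.Dict.keys_foldl_modify, hd]
    rw [PySem.Set.update_eq_append_filter]
    simp
    exact fun a ha => ((mem_msetOf notes f a).mp ha).1

theorem decide_eq_beq (a b : Nat) : (decide (a = b)) = (a == b) := by
  by_cases h : a = b <;> simp [h]

theorem searchEng_eq_split (frag : List (String × String × List String)) (notes : List String) :
    searchEng frag notes =
      ( frag.foldl (fun a f => if (msetOf notes f).length = notes.length then a ++ [f] else a) [],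
        (frag.foldl (fun d f => (msetOf notes f).foldl (fun d m => d.modify m [] (· ++ [f])) d)
          (notes.foldl (fun d note => d.insert note []) PySem.Dict.empty)).items ) := by
  change ((frag.foldl (fun (acc : (List (String × String × List String)) × PySem.Dict String (List (String × String × List String))) f =>
      ((if (msetOf notes f).length = notes.length then acc.1 ++ [f] else acc.1),
       (msetOf notes f).foldl (fun d m => d.modify m [] (· ++ [f])) acc.2))
      ([], notes.foldl (fun d note => d.insert note []) PySem.Dict.empty)).1,
    (frag.foldl (fun (acc : (List (String × String × List String)) × PySem.Dict String (List (String × String × List String))) f =>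
      ((if (msetOf notes f).length = notes.length then acc.1 ++ [f] else acc.1),
       (msetOf notes f).foldl (fun d m => d.modify m [] (· ++ [f])) acc.2))
      ([], notes.foldl (fun d note => d.insert note []) PySem.Dict.empty)).2.items) = _
  have h : (frag.foldl (fun (acc : (List (String × String × List String)) × PySem.Dict String (List (String × String × List String))) f =>
      ((if (msetOf notes f).length = notes.length then acc.1 ++ [f] else acc.1),
       (msetOf notes f).foldl (fun d m => d.modify m [] (· ++ [f])) acc.2))
      ([], notes.foldl (fun d note => d.insert note []) PySem.Dict.empty))
      = (frag.foldl (fun a f => if (msetOf notes f).length = notes.length then a ++ [f] else a) [],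
         frag.foldl (fun d f => (msetOf notes f).foldl (fun d m => d.modify m [] (· ++ [f])) d)
           (notes.foldl (fun d note => d.insert note []) PySem.Dict.empty)) := by
    exact PySem.List.foldl_prod_mk
      (f := fun (a : List (String × String × List String)) f =>
        if (msetOf notes f).length = notes.length then a ++ [f] else a)
      (g := fun (d : PySem.Dict String (List (String × String × List String))) f =>
        (msetOf notes f).foldl (fun d m => d.modify m [] (· ++ [f])) d)
      _ _ _
  rw [h]

theorem altPred_eq_hits (note : String) (f : String × String × List String) :
    ((f.2.2.map PySem.Str.lower).any (fun s => PySem.Str.isIn note s)) = hits f note := by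
  simp [hits, List.any_map, Function.comp_def]

theorem alt_filter_eq (frag : List (String × String × List String)) (note : String) :
    ((frag.map (fun f => (f, f.2.2.map PySem.Str.lower))).filter
        (fun p => p.2.any (fun s => PySem.Str.isIn note s))).map (·.1)
      = frag.filter (fun f => hits f note) := by
  rw [List.filter_map, List.map_map]
  have : ∀ l : List (String × String × List String),
      l.map ((·.1) ∘ (fun f => (f, f.2.2.map PySem.Str.lower))) = l := by
    intro l; simp [Function.comp_def]
  rw [this]
  exact List.filter_congr (fun f _ => altPred_eq_hits note f)

theorem dict_items_ext (d₁ d₂ : PySem.Dict String (List (String × String × List String)))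
    (h₁ : d₁.keys = d₂.keys) (hnd : d₁.keys.Nodup)
    (h : ∀ k ∈ d₁.keys, d₁.getD k [] = d₂.getD k []) : d₁.items = d₂.items := by
  rw [PySem.Dict.items_eq_map_keys d₁ hnd [], PySem.Dict.items_eq_map_keys d₂ (h₁ ▸ hnd) []]
  rw [← h₁]
  exact List.map_congr_left (fun k hk => by rw [h k hk])

-- ===== VERDICT (by name: the statement is the Claim_ definition above) =====
theorem searchEng_spec : Claim_equal_searchEng := by
  intro frag notes _
  show searchEng frag notes = searchEng_alt frag notes
  rw [searchEng_eq_split]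
  unfold searchEng_alt
  refine Prod.ext ?_ ?_
  · -- allNotes component
    show frag.foldl (fun a f => if (msetOf notes f).length = notes.length then a ++ [f] else a) []
      = ((frag.map (fun f => (f, f.2.2.map PySem.Str.lower))).filter (fun p =>
          (PySem.Set.ofList (notes.filter (fun note => p.2.any (fun s => PySem.Str.isIn note s)))).length
            == notes.length)).map (·.1)
    rw [PySem.List.foldl_append_ite_eq_filter, List.filter_map, List.map_map]
    have hmap : ∀ l : List (String × String × List String),
        l.map ((·.1) ∘ (fun f => (f, f.2.2.map PySem.Str.lower))) = l := by
      intro l; simp [Function.comp_def]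
    rw [hmap, List.nil_append]
    refine List.filter_congr ?_
    intro f _
    show decide ((msetOf notes f).length = notes.length)
      = ((PySem.Set.ofList (notes.filter (fun note =>
          (f.2.2.map PySem.Str.lower).any (fun s => PySem.Str.isIn note s)))).length == notes.length)
    rw [msetOf_length,
      show (notes.filter (fun note => (f.2.2.map PySem.Str.lower).any (fun s => PySem.Str.isIn note s)))
          = notes.filter (fun note => hits f note) from
        List.filter_congr (fun note _ => altPred_eq_hits note f)]
    exact decide_eq_beq _ _
  · -- noteResults component
    show (frag.foldl (fun d f => (msetOf notes f).foldl (fun d m => d.modify m [] (· ++ [f])) d)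
        (notes.foldl (fun d note => d.insert note []) PySem.Dict.empty)).items
      = (notes.foldl (fun d note =>
          d.insert note (((frag.map (fun f => (f, f.2.2.map PySem.Str.lower))).filter
            (fun p => p.2.any (fun s => PySem.Str.isIn note s))).map (·.1))) PySem.Dict.empty).items
    have hkeysInit : (notes.foldl (fun d note => d.insert note ([] :
        List (String × String × List String))) PySem.Dict.empty).keys = PySem.Set.ofList notes := by
      rw [PySem.Dict.keys_foldl_insert]; rfl
    have hkeysA := dictA_keys notes frag _ hkeysInit
    have hkeysB : (notes.foldl (fun d note =>
        d.insert note (((frag.map (fun f => (f, f.2.2.map PySem.Str.lower))).filter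
          (fun p => p.2.any (fun s => PySem.Str.isIn note s))).map (·.1))) PySem.Dict.empty).keys
        = PySem.Set.ofList notes := by
      rw [PySem.Dict.keys_foldl_insert]; rfl
    refine dict_items_ext _ _ ?_ ?_ ?_
    · rw [hkeysA, hkeysB]
    · rw [hkeysA]; exact PySem.Set.nodup_ofList _
    · intro k hk
      rw [hkeysA] at hk
      have hkn : k ∈ notes := (PySem.Set.mem_ofList _ _).mp hk
      rw [dictA_getD, getD_foldl_insert_fun, getD_foldl_insert_fun, if_pos hkn, if_pos hkn,
          alt_filter_eq, List.nil_append]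
      exact List.filter_congr (fun f _ => by simp [mem_msetOf, hkn])
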